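-- pv_equiv track=rewrite | github.com/baihaqibb/tubes-tba | TBA.py | isSubjek
-- ===== SOURCE A (Python) =====
-- def isSubjek(word: str) -> bool:
--     # Subjek = {aku, andi, budi, dia, dian}
--     currState = 0
--     for letter in word:
--         match currState:
--             case -1: break
--             case 0:
--                 if letter == 'a': currState = 1
--                 elif letter == 'b': currState = 4
--                 elif letter == 'd': currState = 7
--                 elif letter == ' ': currState = 0
--                 else: currState = -1
--             case 1:
--                 if letter == 'k': currState = 2
--                 elif letter == 'n': currState = 5
--                 else: currState = -1
--             case 2: currState = 3 if letter == 'u' else -1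
--             case 3: currState = 3 if letter == ' ' else -1 # FINAL STATE
--             case 4: currState = 5 if letter == 'u' else -1
--             case 5: currState = 6 if letter == 'd' else -1
--             case 6: currState = 3 if letter == 'i' else -1
--             case 7: currState = 8 if letter == 'i' else -1
--             case 8: currState = 9 if letter == 'a' else -1
--             case 9: currState = 3 if letter == 'n' or letter == ' ' else -1 # FINAL STATE
--     return currState == 3 or currState == 9
-- ===== SOURCE B (Python) =====
-- def isSubjek(word: str) -> bool:
--     # Strip only the space character (the DFA allows only space padding) and test set membership.
--     return word.strip(' ') in {'aku', 'andi', 'budi', 'dia', 'dian'}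
-- ===== Notes on version B (the rewrite author's own statement) =====
-- stated objective: simpler
-- what changed: Replaced the hand-coded 10-state DFA loop with stripping the space padding off both ends of the word and testing membership of the core in the five-word set.
import Mathlib
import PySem

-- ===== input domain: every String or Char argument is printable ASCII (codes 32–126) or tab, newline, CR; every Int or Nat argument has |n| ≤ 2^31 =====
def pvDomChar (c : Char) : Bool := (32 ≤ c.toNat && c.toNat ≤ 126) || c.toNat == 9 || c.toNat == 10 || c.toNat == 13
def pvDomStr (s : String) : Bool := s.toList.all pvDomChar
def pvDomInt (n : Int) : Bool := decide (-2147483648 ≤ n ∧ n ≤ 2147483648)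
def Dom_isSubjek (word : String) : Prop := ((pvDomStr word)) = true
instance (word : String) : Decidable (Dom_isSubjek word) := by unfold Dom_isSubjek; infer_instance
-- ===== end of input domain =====

-- B replaces A's hand-coded 10-state DFA loop by stripping the space padding and testing
-- membership of the core in the five-word set (objective: simpler).

-- ===== PORT A =====
-- one step of A's match statement; Python's `case -1: break` leaves the state -1 for good,
-- so it is modeled (exactly, w.r.t. the final state) by -1 being absorbing
def isSubjekStep (s : Int) (c : Char) : Int :=
  if s = -1 then -1
  else if s = 0 then
    (if c = 'a' then 1 else if c = 'b' then 4 else if c = 'd' then 7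
     else if c = ' ' then 0 else -1)
  else if s = 1 then (if c = 'k' then 2 else if c = 'n' then 5 else -1)
  else if s = 2 then (if c = 'u' then 3 else -1)
  else if s = 3 then (if c = ' ' then 3 else -1)
  else if s = 4 then (if c = 'u' then 5 else -1)
  else if s = 5 then (if c = 'd' then 6 else -1)
  else if s = 6 then (if c = 'i' then 3 else -1)
  else if s = 7 then (if c = 'i' then 8 else -1)
  else if s = 8 then (if c = 'a' then 9 else -1)
  else if s = 9 then (if c = 'n' ∨ c = ' ' then 3 else -1)
  else s

def isSubjek (word : String) : Bool :=
  let currState := word.toList.foldl isSubjekStep 0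
  currState == 3 || currState == 9

-- ===== PORT B =====
def isSubjek_alt (word : String) : Bool :=
  let core := PySem.Str.stripChars word " "
  core == "aku" || core == "andi" || core == "budi" || core == "dia" || core == "dian"

-- ===== PRECONDITION & SPEC =====
def Spec_isSubjek (word : String) (out : Bool) : Prop := out = isSubjek_alt word
instance (word : String) (out : Bool) : Decidable (Spec_isSubjek word out) := by unfold Spec_isSubjek; infer_instance

-- ===== CLAIM (what is proved, stated in full; the proofs are below) =====
def Claim_equal_isSubjek : Prop := ∀ (word : String), Dom_isSubjek word → Spec_isSubjek word (isSubjek word)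

-- ===== LEMMAS AND PROOFS =====

-- proof-side helpers ---------------------------------------------------------
-- the DFA acceptance function, written as structural recursion on the word
def specB (s : Int) : List Char → Bool
  | [] => s == 3 || s == 9
  | c :: r => specB (isSubjekStep s c) r

def trailB (l : List Char) : Bool := l.all (· == ' ')

-- "l = w followed by spaces only"
def endsW : List Char → List Char → Bool
  | [], r => trailB r
  | _ :: _, [] => false
  | a :: w, c :: r => c == a && endsW w r

def lstripB (l : List Char) : List Char := l.dropWhile (· == ' ')
def rstripB (l : List Char) : List Char := (l.reverse.dropWhile (· == ' ')).reverse

theorem foldl_specB (l : List Char) (s : Int) :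
    ((l.foldl isSubjekStep s == 3) || (l.foldl isSubjekStep s == 9)) = specB s l := by
  induction l generalizing s with
  | nil => simp [specB]
  | cons c r ih => simp [specB, List.foldl, ih]

theorem specB_m1 (l : List Char) : specB (-1) l = false := by
  induction l with
  | nil => decide
  | cons c r ih => simp [specB, isSubjekStep, ih]

theorem specB_3 (l : List Char) : specB 3 l = trailB l := by
  induction l with
  | nil => decide
  | cons c r ih =>
    by_cases hc : c = ' ' <;> simp [specB, isSubjekStep, hc, trailB, ih, specB_m1]

theorem specB_2 (l : List Char) : specB 2 l = endsW ['u'] l := by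
  induction l with
  | nil => decide
  | cons c r ih =>
    by_cases hc : c = 'u' <;> simp [specB, isSubjekStep, hc, endsW, specB_3, specB_m1]

theorem specB_6 (l : List Char) : specB 6 l = endsW ['i'] l := by
  induction l with
  | nil => decide
  | cons c r ih =>
    by_cases hc : c = 'i' <;> simp [specB, isSubjekStep, hc, endsW, specB_3, specB_m1]

theorem specB_5 (l : List Char) : specB 5 l = endsW ['d', 'i'] l := by
  induction l with
  | nil => decide
  | cons c r ih =>
    by_cases hc : c = 'd' <;> simp [specB, isSubjekStep, hc, endsW, specB_6, specB_m1]

theorem specB_4 (l : List Char) : specB 4 l = endsW ['u', 'd', 'i'] l := by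
  induction l with
  | nil => decide
  | cons c r ih =>
    by_cases hc : c = 'u' <;> simp [specB, isSubjekStep, hc, endsW, specB_5, specB_m1]

theorem specB_9 (l : List Char) : specB 9 l = (trailB l || endsW ['n'] l) := by
  induction l with
  | nil => decide
  | cons c r ih =>
    by_cases hn : c = 'n'
    · simp [specB, isSubjekStep, hn, endsW, trailB, specB_3]
    · by_cases hs : c = ' ' <;>
        simp [specB, isSubjekStep, hn, hs, endsW, trailB, specB_3, specB_m1]

theorem specB_8 (l : List Char) : specB 8 l = (endsW ['a'] l || endsW ['a', 'n'] l) := by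
  induction l with
  | nil => decide
  | cons c r ih =>
    by_cases hc : c = 'a' <;>
      simp [specB, isSubjekStep, hc, endsW, specB_9, specB_m1, trailB]

theorem specB_7 (l : List Char) :
    specB 7 l = (endsW ['i', 'a'] l || endsW ['i', 'a', 'n'] l) := by
  induction l with
  | nil => decide
  | cons c r ih =>
    by_cases hc : c = 'i' <;> simp [specB, isSubjekStep, hc, endsW, specB_8, specB_m1]

theorem specB_1 (l : List Char) :
    specB 1 l = (endsW ['k', 'u'] l || endsW ['n', 'd', 'i'] l) := by
  induction l with
  | nil => decide
  | cons c r ih =>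
    by_cases hk : c = 'k'
    · simp [specB, isSubjekStep, hk, endsW, specB_2]
    · by_cases hn : c = 'n' <;>
        simp [specB, isSubjekStep, hk, hn, endsW, specB_5, specB_m1]

def or5B (l : List Char) : Bool :=
  endsW ['a','k','u'] l || endsW ['a','n','d','i'] l || endsW ['b','u','d','i'] l ||
    endsW ['d','i','a'] l || endsW ['d','i','a','n'] l

theorem specB_0 (l : List Char) : specB 0 l = or5B (lstripB l) := by
  induction l with
  | nil => decide
  | cons c r ih =>
    by_cases ha : c = 'a'
    · simp [specB, isSubjekStep, ha, or5B, lstripB, endsW, specB_1]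
    · by_cases hb : c = 'b'
      · simp [specB, isSubjekStep, hb, or5B, lstripB, endsW, specB_4]
      · by_cases hd : c = 'd'
        · simp [specB, isSubjekStep, hd, or5B, lstripB, endsW, specB_7]
        · by_cases hs : c = ' '
          · simp [specB, isSubjekStep, hs, lstripB, ih]
          · simp [specB, isSubjekStep, ha, hb, hd, hs, or5B, lstripB, endsW, specB_m1]

theorem rstripB_cons (c : Char) (r : List Char) :
    rstripB (c :: r) = if c = ' ' ∧ rstripB r = [] then [] else c :: rstripB r := by
  have hrr : (rstripB r = []) ↔ (r.reverse.dropWhile (· == ' ') = []) := by simp [rstripB]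
  simp only [rstripB, List.reverse_cons, List.dropWhile_append]
  by_cases h : (r.reverse.dropWhile (· == ' ')) = []
  · by_cases hc : c = ' '
    · simp [h, hc, List.dropWhile]
    · have hb : (c == ' ') = false := by simp [hc]
      simp [h, hb, List.dropWhile]
      exact hc
  · simp [h, List.isEmpty_iff]

theorem trailB_eq (l : List Char) : trailB l = (rstripB l == []) := by
  rw [Bool.eq_iff_iff]
  simp [trailB, rstripB, List.dropWhile_eq_nil_iff, List.all_eq_true]

theorem endsW_eq (l w : List Char) (hw : w.all (· ≠ ' ') = true) :
    endsW w l = (rstripB l == w) := by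
  induction l generalizing w with
  | nil =>
    cases w with
    | nil => decide
    | cons a ws => simp [endsW, rstripB]
  | cons c r ih =>
    cases w with
    | nil =>
      have := trailB_eq (c :: r)
      simpa [endsW] using this
    | cons a ws =>
      simp only [List.all_cons, Bool.and_eq_true, decide_eq_true_eq] at hw
      obtain ⟨ha', hws⟩ := hw
      have hih := ih ws hws
      simp only [endsW, rstripB_cons, hih]
      by_cases hc : c = ' '
      · have hca : c ≠ a := by rw [hc]; exact fun h => ha' h.symm
        by_cases hr : rstripB r = []
        · simp [hc, hr]
          exact fun h => absurd h.symm ha'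
        · simp [hc, hr]
      · by_cases hca : c = a
        · have ha : a ≠ ' ' := hca ▸ hc
          simp [hca, ha]
        · simp [hc]

theorem spaceFun_eq : (fun c : Char => decide (c = ' ')) = (fun x : Char => x == ' ') := by
  funext x; rfl

-- String equality reduces to list equality
theorem string_beq_toList (s t : String) : (s == t) = (s.toList == t.toList) := by
  by_cases h : s = t
  · simp [h]
  · have : s.toList ≠ t.toList := fun hh => h (String.toList_inj.mp hh)
    simp [h, this]

theorem isSubjek_eq (word : String) : isSubjek word = isSubjek_alt word := by
  have hA : isSubjek word = specB 0 word.toList := by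
    simp only [isSubjek]
    exact foldl_specB word.toList 0
  have hstrip : (PySem.Str.stripChars word " ").toList = rstripB (lstripB word.toList) := by
    rw [PySem.Str.toList_stripChars]
    simp [PySem.Chars.stripChars, rstripB, lstripB, spaceFun_eq]
  rw [hA, specB_0, isSubjek_alt]
  simp only [string_beq_toList, hstrip, or5B]
  rw [endsW_eq _ ['a','k','u'] (by decide), endsW_eq _ ['a','n','d','i'] (by decide),
      endsW_eq _ ['b','u','d','i'] (by decide), endsW_eq _ ['d','i','a'] (by decide),
      endsW_eq _ ['d','i','a','n'] (by decide)]
  rfl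

-- ===== VERDICT (by name: the statement is the Claim_ definition above) =====
theorem isSubjek_spec : Claim_equal_isSubjek := by
  intro word _
  unfold Spec_isSubjek
  exact isSubjek_eq word
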